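-- pv_equiv track=rewrite | github.com/zeyu-chen/25t1-comp9021-labs | Lab 3/Solutions/ex_4_sol.py | f4_1
-- ===== SOURCE A (Python) =====
-- def f4_1(n: int, base: int) -> dict[int, tuple[int]]:
--     """
--     Creates a dictionary mapping integers from 0 to n to their representation in the specified base.
--
--     Uses iterative division by base to convert decimal numbers to the target base.
--
--     Args:
--         n: The upper limit of numbers to convert (inclusive)
--         base: The target base (between 2 and 9)
--
--     Returns:
--         A dictionary where keys are integers from 0 to n and values are tuples
--         representing those numbers in the specified base
--     """
--     # Initialize dictionary with special case for 0
--     D = {0: (0,)}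
--
--     # Process each number from 1 to n
--     for m in range(1, n + 1):
--         digits = []  # List to store digits in reverse order
--         p = m  # Working copy of the number
--
--         # Convert decimal to the specified base
--         while p:
--             digits.append(p % base)  # Get remainder (current digit)
--             p //= base  # Integer division to get quotient
--
--         # Reverse digits to get correct order and convert to tuple
--         D[m] = tuple(reversed(digits))
--
--     return D
-- ===== SOURCE B (Python) =====
-- def _inc(ds, base):
--     """Add 1 to a least-significant-first digit list, returning a new list."""
--     if not ds:
--         return [1]
--     if ds[0] + 1 < base:
--         return [ds[0] + 1] + ds[1:]
--     return [0] + _inc(ds[1:], base)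
--
--
-- def f4_1(n: int, base: int) -> dict[int, tuple[int]]:
--     # Odometer: each number's digit list is obtained by incrementing the
--     # previous one (amortized O(1) carries), instead of re-dividing by base.
--     D = {0: (0,)}
--     digits = [0]  # least-significant-first digits of the current number
--     for m in range(1, n + 1):
--         digits = _inc(digits, base)
--         D[m] = tuple(reversed(digits))
--     return D
-- ===== Notes on version B (the rewrite author's own statement) =====
-- stated objective: alternative
-- what changed: B replaces A's per-number division loop (re-deriving every number's digits by repeated % and // by base) with an odometer: each number's least-significant-first digit list is obtained by incrementing the previous one with carry propagation.
-- outside the precondition, e.g. on f4_1(1, -2): A returns {0: (0,), 1: (-1, -1)}, B returns {0: (0,), 1: (1, 0)}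
import Mathlib
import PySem

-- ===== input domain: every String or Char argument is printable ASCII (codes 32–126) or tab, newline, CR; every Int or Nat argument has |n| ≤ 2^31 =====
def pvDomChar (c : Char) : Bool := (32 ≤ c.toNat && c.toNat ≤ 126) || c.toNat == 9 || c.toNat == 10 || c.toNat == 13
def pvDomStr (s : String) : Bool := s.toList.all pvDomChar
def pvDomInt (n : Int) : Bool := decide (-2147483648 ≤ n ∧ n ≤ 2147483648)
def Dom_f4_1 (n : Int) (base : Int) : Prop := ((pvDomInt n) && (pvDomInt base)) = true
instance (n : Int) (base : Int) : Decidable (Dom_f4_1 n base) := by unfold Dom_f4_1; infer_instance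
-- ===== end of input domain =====

-- B computes each number's digit list by incrementing the previous one (an odometer)
-- instead of A's repeated division by base; equivalence is proved on the documented
-- domain base ≥ 2 (the function's docstring: base between 2 and 9).

-- ===== PORT A =====
-- A's inner `while p:` loop: collects p % base (least significant first) while dividing p.
-- The `2 ≤ base` conjunct in the guard is only a totality guard (Python's condition is
-- `p != 0`); on admitted inputs (base ≥ 2, p = m ≥ 1) the two conditions coincide.
def digitsA (p : Int) (base : Int) : List Int :=
  if h : 0 < p ∧ 2 ≤ base then
    PySem.Int.mod p base :: digitsA (PySem.Int.floordiv p base) base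
  else []
termination_by p.toNat
decreasing_by
  rcases h with ⟨hp, hb⟩
  have h1 : p = ((p.toNat : Nat) : Int) := by omega
  have h2 : base = ((base.toNat : Nat) : Int) := by omega
  rw [h1, h2, PySem.Int.floordiv_natCast]
  simp only [Int.toNat_natCast]
  exact Nat.div_lt_self (by omega) (by omega)

def f4_1 (n : Int) (base : Int) : List (Int × List Int) :=
  ((PySem.List.pyRange 1 (n + 1) 1).foldl
      (fun D m => D.insert m ((digitsA m base).reverse))
      (PySem.Dict.ofList [((0 : Int), [(0 : Int)])])).items

-- ===== PORT B =====
-- Source B's `_inc`: add 1 to a least-significant-first digit list.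
def incB (base : Int) : List Int → List Int
  | [] => [1]
  | d :: ds => if d + 1 < base then (d + 1) :: ds else 0 :: incB base ds

def f4_1_alt (n : Int) (base : Int) : List (Int × List Int) :=
  (((PySem.List.pyRange 1 (n + 1) 1).foldl
      (fun (st : List Int × PySem.Dict Int (List Int)) m =>
        let ds := incB base st.1
        (ds, st.2.insert m ds.reverse))
      ([0], PySem.Dict.ofList [((0 : Int), [(0 : Int)])])).2).items

-- ===== PRECONDITION & SPEC =====
-- Pre_ restricts to the documented domain base ≥ 2 (the docstring: "base (between 2 and 9)"),
-- plus the trivial n ≤ 0 case where the loop never runs (any base). For base ≤ -2 with n ≥ 1,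
-- A happens to return digit strings with negative digits (Python's floor-division artefact,
-- outside the function's purpose), which B does not reproduce; for base ∈ {-1, 1} with n ≥ 1
-- A loops forever and for base = 0 with n ≥ 1 it raises ZeroDivisionError.
def Pre_f4_1 (n : Int) (base : Int) : Prop := 2 ≤ base ∨ n ≤ 0
instance (n : Int) (base : Int) : Decidable (Pre_f4_1 n base) := by unfold Pre_f4_1; infer_instance
def pvWitness_f4_1 : Int × Int := (6, 2)
def Spec_f4_1 (n : Int) (base : Int) (out : List (Int × List Int)) : Prop := out = f4_1_alt n base
instance (n : Int) (base : Int) (out : List (Int × List Int)) : Decidable (Spec_f4_1 n base out) := by unfold Spec_f4_1; infer_instance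

-- ===== CLAIM (what is proved, stated in full; the proofs are below) =====
def Claim_equal_f4_1 : Prop := ∀ (n : Int) (base : Int), Dom_f4_1 n base → Pre_f4_1 n base → Spec_f4_1 n base (f4_1 n base)

-- ===== LEMMAS AND PROOFS =====

lemma digitsA_nonpos (p base : Int) (hp : p ≤ 0) : digitsA p base = [] := by
  rw [digitsA]; simp; omega

lemma digitsA_natCast (k b : Nat) (hb : 2 ≤ b) (hk : 0 < k) :
    digitsA (k : Int) (b : Int) =
      ((k % b : Nat) : Int) :: digitsA ((k / b : Nat) : Int) (b : Int) := by
  rw [digitsA]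
  rw [dif_pos (by constructor <;> omega)]
  rw [PySem.Int.mod_natCast, PySem.Int.floordiv_natCast]

lemma digitsA_one_nat (b : Nat) (hb : 2 ≤ b) : digitsA (1 : Int) (b : Int) = [1] := by
  have h := digitsA_natCast 1 b hb (by omega)
  rw [Nat.mod_eq_of_lt (by omega), Nat.div_eq_of_lt (by omega)] at h
  simpa [digitsA_nonpos] using h

-- the odometer step: incrementing m's digit list yields (m+1)'s digit list
lemma incB_digitsA_nat (b : Nat) (hb : 2 ≤ b) :
    ∀ k : Nat, incB (b : Int) (digitsA (k : Int) (b : Int)) = digitsA ((k + 1 : Nat) : Int) (b : Int) := by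
  intro k
  induction k using Nat.strong_induction_on with
  | _ k ih =>
    rcases Nat.eq_zero_or_pos k with hk | hk
    · subst hk
      simpa [digitsA_nonpos (0 : Int) (b : Int) le_rfl, incB] using (digitsA_one_nat b hb).symm
    · rw [digitsA_natCast k b hb hk]
      have hqr : b * (k / b) + k % b = k := Nat.div_add_mod k b
      have hrlt : k % b < b := Nat.mod_lt k (by omega)
      have hdiv_lt : k / b < k := Nat.div_lt_self hk (by omega)
      by_cases hcar : k % b + 1 < b
      · -- no carry
        have huniq := (Nat.div_mod_unique (b := b) (a := k + 1) (d := k / b)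
          (c := k % b + 1) (by omega)).mpr ⟨by omega, by omega⟩
        rw [digitsA_natCast (k + 1) b hb (by omega), huniq.2, huniq.1]
        simp only [incB]
        rw [if_pos (by omega)]
        push_cast
        rfl
      · -- carry: k % b = b - 1
        have hmul : b * (k / b + 1) = b * (k / b) + b := by ring
        have huniq := (Nat.div_mod_unique (b := b) (a := k + 1) (d := k / b + 1)
          (c := 0) (by omega)).mpr ⟨by omega, by omega⟩
        rw [digitsA_natCast (k + 1) b hb (by omega), huniq.2, huniq.1]
        simp only [incB]
        rw [if_neg (by omega)]
        rw [ih (k / b) hdiv_lt]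
        norm_num

lemma loop_eq (b : Nat) (hb : 2 ≤ b) :
    ∀ k : Nat,
      (PySem.List.pyRange 1 ((k : Int) + 1) 1).foldl
          (fun (st : List Int × PySem.Dict Int (List Int)) m =>
            let ds := incB (b : Int) st.1
            (ds, st.2.insert m ds.reverse))
          ([0], PySem.Dict.ofList [((0 : Int), [(0 : Int)])])
      = ((if k = 0 then [0] else digitsA (k : Int) (b : Int)),
         (PySem.List.pyRange 1 ((k : Int) + 1) 1).foldl
           (fun D m => D.insert m ((digitsA m (b : Int)).reverse))
           (PySem.Dict.ofList [((0 : Int), [(0 : Int)])])) := by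
  intro k
  induction k with
  | zero =>
    rw [PySem.List.pyRange_one_eq_nil (by omega)]
    simp
  | succ k ih =>
    have hrange : PySem.List.pyRange 1 ((↑(k + 1) : Int) + 1) 1 =
        PySem.List.pyRange 1 ((k : Int) + 1) 1 ++ [((k : Int) + 1)] := by
      push_cast
      exact PySem.List.pyRange_one_succ_right (by omega)
    rw [hrange, List.foldl_append, List.foldl_append, ih]
    have hstep : incB (b : Int) (if k = 0 then [0] else digitsA (k : Int) (b : Int)) =
        digitsA ((k : Int) + 1) (b : Int) := by
      rcases Nat.eq_zero_or_pos k with hk | hk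
      · subst hk
        have h01 : incB (b : Int) [0] = [1] := by
          simp only [incB]
          rw [if_pos (by omega)]
          norm_num
        rw [if_pos rfl, h01]
        norm_num
        exact (digitsA_one_nat b hb).symm
      · rw [if_neg (by omega)]
        have := incB_digitsA_nat b hb k
        push_cast at this ⊢
        exact this
    simp only [List.foldl]
    rw [hstep]
    simp

lemma main_nat (b k : Nat) (hb : 2 ≤ b) : f4_1 (k : Int) (b : Int) = f4_1_alt (k : Int) (b : Int) := by
  unfold f4_1 f4_1_alt
  rw [loop_eq b hb k]

-- ===== VERDICT (by name: the statement is the Claim_ definition above) =====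
theorem f4_1_spec : Claim_equal_f4_1 := by
  intro n base _ hpre
  unfold Spec_f4_1
  unfold Pre_f4_1 at hpre
  by_cases hn : n ≤ 0
  · unfold f4_1 f4_1_alt
    rw [PySem.List.pyRange_one_eq_nil (by omega)]
    simp
  · have hb : 2 ≤ base := by rcases hpre with h | h; exact h; omega
    have hn' : n = ((n.toNat : Nat) : Int) := by omega
    have hb' : base = ((base.toNat : Nat) : Int) := by omega
    rw [hn', hb']
    exact main_nat base.toNat n.toNat (by omega)
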